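-- pv_equiv track=rewrite | github.com/R1ymundo/Criptografia | crypto 2/P3/prueba.py | calculate_generators
-- ===== SOURCE A (Python) =====
-- def inverse_modulo(number, modulus):
--     """Encuentra el inverso multiplicativo de 'number' módulo 'modulus'."""
--     for i in range(1, modulus):
--         if (number * i) % modulus == 1:
--             return i
--     return None
--
-- def point_doubling(x1, y1, a, p):
--     """Realiza la operación de duplicación de puntos en la curva elíptica y^2 = x^3 + ax + b (mod p)."""
--     if y1 == 0:
--         return None, None  # Punto en el infinito
--
--     im = inverse_modulo(2 * y1, p)
--     if im is not None:
--         l = (3 * x1**2 + a) * im % p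
--         x3 = (l**2 - 2 * x1) % p
--         y3 = (l * (x1 - x3) - y1) % p
--         return x3, y3
--     else:
--         return None, None
--
-- def point_addition(x1, y1, x2, y2, p):
--     """Realiza la operación de suma de puntos en la curva elíptica y^2 = x^3 + ax + b (mod p)."""
--     if x1 == x2 and y1 == (-y2 % p):
--         return None, None  # Punto en el infinito
--
--     im = inverse_modulo(x2 - x1, p)
--     if im is not None:
--         l = (y2 - y1) * im % p
--         x3 = (l**2 - x1 - x2) % p
--         y3 = (l * (x1 - x3) - y1) % p
--         return x3, y3
--     else:
--         return None, None
--
-- def calculate_generators(points, a, p):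
--     """Calcula los puntos generadores en la curva elíptica y^2 = x^3 + ax + b (mod p)."""
--     generators = []
--     for i in range(1, len(points)):
--         for j in range(i + 1, len(points) + 1):
--             if (i + j) <= len(points):
--                 x1, y1 = points[i - 1]
--                 x2, y2 = points[j - 1]
--                 x1, y1, x2, y2 = x1 % p, y1 % p, x2 % p, y2 % p
--
--                 if x1 == x2 and y1 == (-y2 % p):  # Puntos iguales pero en signos opuestos
--                     continue
--
--                 x3, y3 = point_addition(x1, y1, x2, y2, p)
--                 if x3 is not None and y3 is not None:
--                     generators.append((x3, y3))
--
--                 x3, y3 = point_doubling(x1, y1, a, p)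
--                 if x3 is not None and y3 is not None:
--                     generators.append((x3, y3))
--
--     return generators
-- ===== SOURCE B (Python) =====
-- def _inverse_modulo(number, modulus):
--     """Modular inverse via the iterative extended Euclidean algorithm (O(log modulus))."""
--     if modulus <= 1:
--         return None
--     old_r, r = number % modulus, modulus
--     old_s, s = 1, 0
--     while r != 0:
--         q = old_r // r
--         old_r, r = r, old_r - q * r
--         old_s, s = s, old_s - q * s
--     if old_r != 1:
--         return None
--     return old_s % modulus
--
-- def _pair_points(x1, y1, x2, y2, a, p):
--     """The 0, 1 or 2 curve points contributed by one (already reduced) pair: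
--     chord addition first, then tangent doubling of the first point."""
--     if x1 == x2 and y1 == (-y2) % p:
--         return []
--     out = []
--     im = _inverse_modulo(x2 - x1, p)
--     if im is not None:
--         l = (y2 - y1) * im % p
--         x3 = (l ** 2 - x1 - x2) % p
--         out.append((x3, (l * (x1 - x3) - y1) % p))
--     if y1 != 0:
--         im = _inverse_modulo(2 * y1, p)
--         if im is not None:
--             l = (3 * x1 ** 2 + a) * im % p
--             x3 = (l ** 2 - 2 * x1) % p
--             out.append((x3, (l * (x1 - x3) - y1) % p))
--     return out
--
-- def calculate_generators(points, a, p):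
--     n = len(points)
--     return [pt
--             for i in range(1, n)
--             for j in range(i + 1, n + 1)
--             if i + j <= n
--             for pt in _pair_points(points[i - 1][0] % p, points[i - 1][1] % p,
--                                    points[j - 1][0] % p, points[j - 1][1] % p, a, p)]
-- ===== Notes on version B (the rewrite author's own statement) =====
-- stated objective: faster
-- what changed: B is restructured as a single flat list comprehension (flatMap) over the index pairs with one merged helper that returns the 0-2 points a pair contributes, instead of A's accumulator loop with two conditional appends and separate point_addition/point_doubling functions, and the modular inverse is computed by the iterative extended Euclidean algorithm instead of A's linear scan over all residues.
import Mathlib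
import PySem

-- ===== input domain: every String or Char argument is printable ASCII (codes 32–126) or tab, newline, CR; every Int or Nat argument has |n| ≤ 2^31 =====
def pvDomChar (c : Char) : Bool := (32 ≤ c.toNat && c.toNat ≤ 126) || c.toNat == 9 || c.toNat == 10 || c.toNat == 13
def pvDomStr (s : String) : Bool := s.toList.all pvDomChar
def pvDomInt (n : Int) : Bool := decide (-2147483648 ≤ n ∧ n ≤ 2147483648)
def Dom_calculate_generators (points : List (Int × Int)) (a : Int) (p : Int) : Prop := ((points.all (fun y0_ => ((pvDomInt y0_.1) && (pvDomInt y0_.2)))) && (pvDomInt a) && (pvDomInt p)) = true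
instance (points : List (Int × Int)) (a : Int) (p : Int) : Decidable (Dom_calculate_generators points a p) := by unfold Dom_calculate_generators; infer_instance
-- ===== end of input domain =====

-- B flattens the pairwise loop into one flatMap with a single merged per-pair helper
-- (0–2 points per pair) and computes the modular inverse by the extended Euclidean
-- algorithm instead of A's linear scan over all residues.

-- ===== PORT A =====
-- the 'for i in range(1, modulus): if (number*i) % modulus == 1: return i' scan
def invScan (number modulus : Int) : List Int → Option Int
  | [] => none
  | i :: rest =>
      if PySem.Int.mod (number * i) modulus = 1 then some i
      else invScan number modulus rest

def inverse_modulo (number modulus : Int) : Option Int :=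
  invScan number modulus (PySem.List.pyRange 1 modulus 1)

def point_doubling (x1 y1 a p : Int) : Option Int × Option Int :=
  if y1 = 0 then (none, none)
  else
    match inverse_modulo (2 * y1) p with
    | some im =>
        let l := PySem.Int.mod ((3 * x1 ^ 2 + a) * im) p
        let x3 := PySem.Int.mod (l ^ 2 - 2 * x1) p
        let y3 := PySem.Int.mod (l * (x1 - x3) - y1) p
        (some x3, some y3)
    | none => (none, none)

def point_addition (x1 y1 x2 y2 p : Int) : Option Int × Option Int :=
  if x1 = x2 ∧ y1 = PySem.Int.mod (-y2) p then (none, none)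
  else
    match inverse_modulo (x2 - x1) p with
    | some im =>
        let l := PySem.Int.mod ((y2 - y1) * im) p
        let x3 := PySem.Int.mod (l ^ 2 - x1 - x2) p
        let y3 := PySem.Int.mod (l * (x1 - x3) - y1) p
        (some x3, some y3)
    | none => (none, none)

-- indices i-1, j-1 are always in range thanks to the 'i + j <= len(points)' gate,
-- so pyGetD with a dummy default is exact
def calculate_generators (points : List (Int × Int)) (a : Int) (p : Int) : List (Int × Int) :=
  (PySem.List.pyRange 1 (points.length : Int) 1).foldl (fun gens i =>
    (PySem.List.pyRange (i + 1) ((points.length : Int) + 1) 1).foldl (fun gens j =>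
      if i + j ≤ (points.length : Int) then
        let q1 := PySem.List.pyGetD points (i - 1) (0, 0)
        let q2 := PySem.List.pyGetD points (j - 1) (0, 0)
        let x1 := PySem.Int.mod q1.1 p
        let y1 := PySem.Int.mod q1.2 p
        let x2 := PySem.Int.mod q2.1 p
        let y2 := PySem.Int.mod q2.2 p
        if x1 = x2 ∧ y1 = PySem.Int.mod (-y2) p then gens
        else
          let gens :=
            match point_addition x1 y1 x2 y2 p with
            | (some x3, some y3) => gens ++ [(x3, y3)]
            | _ => gens
          match point_doubling x1 y1 a p with
          | (some x3, some y3) => gens ++ [(x3, y3)]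
          | _ => gens
      else gens) gens) []

-- ===== PORT B =====
-- the 'while r != 0' extended-Euclid loop of Source B; the 'r < 0' arm only makes the
-- recursion total (every call from inverse_modulo_alt keeps r ≥ 0)
def egcdLoop (old_r r old_s s : Int) : Int × Int :=
  if r = 0 ∨ r < 0 then (old_r, old_s)
  else
    let q := PySem.Int.floordiv old_r r
    egcdLoop r (old_r - q * r) s (old_s - q * s)
termination_by r.toNat
decreasing_by
  rename_i h
  have hr : 0 < r := by omega
  have hE : old_r - PySem.Int.floordiv old_r r * r = old_r % r := by
    rw [PySem.Int.floordiv_eq_ediv_of_pos hr, Int.emod_def]; ring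
  rw [hE]
  have h2 := Int.emod_lt_of_pos old_r hr
  have h3 := Int.emod_nonneg old_r (by omega : r ≠ 0)
  omega

def inverse_modulo_alt (number modulus : Int) : Option Int :=
  if modulus ≤ 1 then none
  else
    let res := egcdLoop (PySem.Int.mod number modulus) modulus 1 0
    if res.1 ≠ 1 then none
    else some (PySem.Int.mod res.2 modulus)

-- the 0, 1 or 2 points one reduced pair contributes: chord addition, then doubling
def pairItems (x1 y1 x2 y2 a p : Int) : List (Int × Int) :=
  if x1 = x2 ∧ y1 = PySem.Int.mod (-y2) p then []
  else
    (match inverse_modulo_alt (x2 - x1) p with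
     | some im =>
        let l := PySem.Int.mod ((y2 - y1) * im) p
        let x3 := PySem.Int.mod (l ^ 2 - x1 - x2) p
        [(x3, PySem.Int.mod (l * (x1 - x3) - y1) p)]
     | none => []) ++
    (if y1 = 0 then []
     else
       match inverse_modulo_alt (2 * y1) p with
       | some im =>
          let l := PySem.Int.mod ((3 * x1 ^ 2 + a) * im) p
          let x3 := PySem.Int.mod (l ^ 2 - 2 * x1) p
          [(x3, PySem.Int.mod (l * (x1 - x3) - y1) p)]
       | none => [])

-- the flat comprehension of Source B
def calculate_generators_alt (points : List (Int × Int)) (a : Int) (p : Int) : List (Int × Int) :=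
  (PySem.List.pyRange 1 (points.length : Int) 1).flatMap (fun i =>
    (PySem.List.pyRange (i + 1) ((points.length : Int) + 1) 1).flatMap (fun j =>
      if i + j ≤ (points.length : Int) then
        let q1 := PySem.List.pyGetD points (i - 1) (0, 0)
        let q2 := PySem.List.pyGetD points (j - 1) (0, 0)
        pairItems (PySem.Int.mod q1.1 p) (PySem.Int.mod q1.2 p)
                  (PySem.Int.mod q2.1 p) (PySem.Int.mod q2.2 p) a p
      else []))

-- ===== PRECONDITION & SPEC =====
-- Pre_ excludes only inputs where A raises ZeroDivisionError: p = 0 with at least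
-- 3 points (the '% p' reductions inside the loop body, which runs iff len(points) ≥ 3)
def Pre_calculate_generators (points : List (Int × Int)) (a : Int) (p : Int) : Prop :=
  p ≠ 0 ∨ points.length < 3
instance (points : List (Int × Int)) (a : Int) (p : Int) : Decidable (Pre_calculate_generators points a p) := by unfold Pre_calculate_generators; infer_instance
def pvWitness_calculate_generators : (List (Int × Int)) × Int × Int := ([(1, 2), (3, 4), (5, 6)], 2, 7)

def Spec_calculate_generators (points : List (Int × Int)) (a : Int) (p : Int) (out : List (Int × Int)) : Prop := out = calculate_generators_alt points a p
instance (points : List (Int × Int)) (a : Int) (p : Int) (out : List (Int × Int)) : Decidable (Spec_calculate_generators points a p out) := by unfold Spec_calculate_generators; infer_instance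

-- ===== CLAIM (what is proved, stated in full; the proofs are below) =====
def Claim_equal_calculate_generators : Prop := ∀ (points : List (Int × Int)) (a : Int) (p : Int), Dom_calculate_generators points a p → Pre_calculate_generators points a p → Spec_calculate_generators points a p (calculate_generators points a p)

-- ===== LEMMAS AND PROOFS =====

-- the scan returns none when no candidate satisfies the predicate
theorem invScan_none (n m : Int) (l : List Int)
    (h : ∀ i ∈ l, PySem.Int.mod (n * i) m ≠ 1) : invScan n m l = none := by
  induction l with
  | nil => rfl
  | cons i rest ih =>
      simp only [invScan]
      rw [if_neg (h i List.mem_cons_self)]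
      exact ih (fun j hj => h j (List.mem_cons_of_mem _ hj))

-- the scan returns x when x is in the list and is the ONLY element satisfying the predicate
theorem invScan_some (n m x : Int) (l : List Int)
    (hx : x ∈ l) (hpx : PySem.Int.mod (n * x) m = 1)
    (huniq : ∀ i ∈ l, PySem.Int.mod (n * i) m = 1 → i = x) :
    invScan n m l = some x := by
  induction l with
  | nil => cases hx
  | cons i rest ih =>
      simp only [invScan]
      by_cases hi : PySem.Int.mod (n * i) m = 1
      · rw [if_pos hi, huniq i List.mem_cons_self hi]
      · rw [if_neg hi]
        have hx' : x ∈ rest := by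
          cases List.mem_cons.mp hx with
          | inl h => exact absurd (h ▸ hpx) hi
          | inr h => exact h
        exact ih hx' (fun j hj hpj => huniq j (List.mem_cons_of_mem _ hj) hpj)

-- Euclid-loop invariant: the first component is the gcd of the two remainders
theorem egcdLoop_fst (a b sa sb : Int) (ha : 0 ≤ a) (hb : 0 ≤ b) :
    (egcdLoop a b sa sb).1 = (Int.gcd a b : Int) := by
  fun_induction egcdLoop a b sa sb with
  | case1 a b sa sb h =>
      have hb0 : b = 0 := by omega
      subst hb0
      simp [Int.gcd, Int.natAbs_of_nonneg ha]
  | case2 a b sa sb h q ih =>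
      have hbpos : 0 < b := by omega
      have hq : q = a / b := PySem.Int.floordiv_eq_ediv_of_pos hbpos
      have hmod : a - q * b = a % b := by rw [hq, Int.emod_def]; ring
      have h1 : 0 ≤ a - q * b := by
        rw [hmod]; exact Int.emod_nonneg a (by omega)
      rw [ih hb h1, hmod]
      rw [show Int.gcd b (a % b) = Int.gcd (a % b) b from Int.gcd_comm b (a % b),
          Int.gcd_emod a b]

-- Euclid-loop invariant: s-coefficient times n is congruent to the remainder mod m
theorem egcdLoop_snd (m n : Int) (a b sa sb : Int)
    (hA : Int.ModEq m (sa * n) a) (hB : Int.ModEq m (sb * n) b) :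
    Int.ModEq m ((egcdLoop a b sa sb).2 * n) (egcdLoop a b sa sb).1 := by
  fun_induction egcdLoop a b sa sb with
  | case1 a b sa sb h => exact hA
  | case2 a b sa sb h q ih =>
      refine ih hB ?_
      calc (sa - q * sb) * n = sa * n - q * (sb * n) := by ring
        _ ≡ a - q * b [ZMOD m] := hA.sub (Int.ModEq.mul_left q hB)

-- KEY LEMMA: the linear scan and the extended Euclid compute the same modular inverse
theorem inv_eq (n m : Int) : inverse_modulo n m = inverse_modulo_alt n m := by
  by_cases hm : m ≤ 1
  · unfold inverse_modulo inverse_modulo_alt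
    rw [if_pos hm, PySem.List.pyRange_one_eq_nil hm]
    rfl
  · have hm1 : 1 < m := by omega
    have hmpos : 0 < m := by omega
    have hmod_eq : ∀ x : Int, PySem.Int.mod x m = x % m :=
      fun x => PySem.Int.mod_eq_emod_of_pos hmpos
    set n' : Int := n % m with hn'
    have hn'0 : 0 ≤ n' := Int.emod_nonneg n (by omega)
    have hn'lt : n' < m := Int.emod_lt_of_pos n hmpos
    have hnn' : Int.ModEq m n' n := Int.emod_emod_of_dvd n (dvd_refl m)
    have hgfst : (egcdLoop n' m 1 0).1 = (Int.gcd n' m : Int) :=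
      egcdLoop_fst n' m 1 0 hn'0 (le_of_lt hmpos)
    have hgsnd : Int.ModEq m ((egcdLoop n' m 1 0).2 * n') (egcdLoop n' m 1 0).1 :=
      egcdLoop_snd m n' n' m 1 0 (by simpa using Int.ModEq.refl n') (by simp [Int.ModEq])
    have hgcd_nm : Int.gcd n' m = Int.gcd n m := Int.gcd_emod n m
    unfold inverse_modulo inverse_modulo_alt
    rw [if_neg (by omega : ¬ m ≤ 1)]
    rw [show PySem.Int.mod n m = n' from hmod_eq n]
    by_cases hg : Int.gcd n' m = 1
    · -- inverse exists; both return sc % m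
      have hg1 : (egcdLoop n' m 1 0).1 = 1 := by rw [hgfst, hg]; rfl
      set sc : Int := (egcdLoop n' m 1 0).2 with hsc
      set x : Int := sc % m with hx
      have hx0 : 0 ≤ x := Int.emod_nonneg sc (by omega)
      have hxlt : x < m := Int.emod_lt_of_pos sc hmpos
      have hsc1 : Int.ModEq m (sc * n') 1 := hg1 ▸ hgsnd
      have hxsc : Int.ModEq m x sc := Int.emod_emod_of_dvd sc (dvd_refl m)
      have hmeq : Int.ModEq m (n * x) 1 := by
        calc n * x ≡ n' * x [ZMOD m] := Int.ModEq.mul_right x hnn'.symm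
          _ ≡ n' * sc [ZMOD m] := Int.ModEq.mul_left n' hxsc
          _ = sc * n' := by ring
          _ ≡ 1 [ZMOD m] := hsc1
      have hnx : (n * x) % m = 1 := by
        have := hmeq
        unfold Int.ModEq at this
        rw [this, Int.emod_eq_of_lt (by omega) hm1]
      have hxne : x ≠ 0 := by
        intro h0
        rw [h0, mul_zero] at hnx
        simp at hnx
      simp only [ne_eq, hg1]
      rw [if_neg (by simp)]
      have hscan : invScan n m (PySem.List.pyRange 1 m 1) = some x := by
        apply invScan_some
        · rw [PySem.List.mem_pyRange_one]; omega
        · rw [hmod_eq]; exact hnx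
        · intro i hi hpi
          rw [PySem.List.mem_pyRange_one] at hi
          rw [hmod_eq] at hpi
          have h1 : Int.ModEq m i x := by
            calc i = i * 1 := by ring
              _ ≡ i * (n * x) [ZMOD m] := (Int.ModEq.mul_left i hmeq).symm
              _ = x * (n * i) := by ring
              _ ≡ x * 1 [ZMOD m] := Int.ModEq.mul_left x (by unfold Int.ModEq; rw [hpi, Int.emod_eq_of_lt (by omega) hm1])
              _ = x := by ring
          unfold Int.ModEq at h1
          rw [Int.emod_eq_of_lt (by omega) (by omega), Int.emod_eq_of_lt (by omega) (by omega)] at h1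
          exact h1
      rw [hscan, hmod_eq]
    · -- no inverse; both return none
      have hg1 : (egcdLoop n' m 1 0).1 ≠ 1 := by
        rw [hgfst]
        exact_mod_cast fun h => hg (by exact_mod_cast h)
      rw [if_pos (by simpa using hg1)]
      apply invScan_none
      intro i hi hpi
      rw [hmod_eq] at hpi
      have hd : ((Int.gcd n m : Int)) ∣ 1 := by
        have h1 : ((Int.gcd n m : Int)) ∣ n := Int.gcd_dvd_left ..
        have h2 : ((Int.gcd n m : Int)) ∣ m := Int.gcd_dvd_right ..
        have h3 : m ∣ n * i - 1 := by
          have : (n * i) % m = 1 % m := by rw [hpi, Int.emod_eq_of_lt (by omega) hm1]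
          exact Int.ModEq.dvd (Int.ModEq.symm this)
        have h4 : ((Int.gcd n m : Int)) ∣ n * i := h1.mul_right i
        have h5 : ((Int.gcd n m : Int)) ∣ n * i - 1 := h2.trans h3
        have := dvd_sub h4 h5
        simpa using this
      have hnat : Int.gcd n m ∣ 1 := by exact_mod_cast hd
      exact hg (hgcd_nm ▸ Nat.dvd_one.mp hnat)

-- accumulator loops whose body only appends equal acc ++ flatMap
theorem foldl_body_eq_flatMap {α β : Type} (f : List α → β → List α) (g : β → List α)
    (hfg : ∀ acc x, f acc x = acc ++ g x) :
    ∀ (l : List β) (acc : List α), l.foldl f acc = acc ++ l.flatMap g := by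
  intro l
  induction l with
  | nil => intro acc; simp
  | cons x rest ih =>
      intro acc
      simp only [List.foldl_cons, List.flatMap_cons, hfg]
      rw [ih, List.append_assoc]

-- one A loop body equals appending B's merged per-pair helper
theorem body_eq (gens : List (Int × Int)) (x1 y1 x2 y2 a p : Int) :
    (if x1 = x2 ∧ y1 = PySem.Int.mod (-y2) p then gens
     else
       let gens' :=
         match point_addition x1 y1 x2 y2 p with
         | (some x3, some y3) => gens ++ [(x3, y3)]
         | _ => gens
       match point_doubling x1 y1 a p with
       | (some x3, some y3) => gens' ++ [(x3, y3)]
       | _ => gens')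
    = gens ++ pairItems x1 y1 x2 y2 a p := by
  unfold pairItems
  by_cases hopp : x1 = x2 ∧ y1 = PySem.Int.mod (-y2) p
  · rw [if_pos hopp, if_pos hopp, List.append_nil]
  · rw [if_neg hopp, if_neg hopp]
    unfold point_addition point_doubling
    rw [if_neg hopp, inv_eq]
    by_cases hy : y1 = 0
    · rw [if_pos hy, if_pos hy]
      rcases inverse_modulo_alt (x2 - x1) p with _ | im <;> simp
    · rw [if_neg hy, if_neg hy, inv_eq]
      rcases inverse_modulo_alt (x2 - x1) p with _ | im <;>
        rcases inverse_modulo_alt (2 * y1) p with _ | im2 <;> simp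
-- ===== VERDICT (by name: the statement is the Claim_ definition above) =====
theorem calculate_generators_spec : Claim_equal_calculate_generators := by
  intro points a p _ _
  unfold Spec_calculate_generators calculate_generators calculate_generators_alt
  have hinner : ∀ (i : Int) (gens : List (Int × Int)),
      (PySem.List.pyRange (i + 1) ((points.length : Int) + 1) 1).foldl (fun gens j =>
        if i + j ≤ (points.length : Int) then
          let q1 := PySem.List.pyGetD points (i - 1) (0, 0)
          let q2 := PySem.List.pyGetD points (j - 1) (0, 0)
          let x1 := PySem.Int.mod q1.1 p
          let y1 := PySem.Int.mod q1.2 p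
          let x2 := PySem.Int.mod q2.1 p
          let y2 := PySem.Int.mod q2.2 p
          if x1 = x2 ∧ y1 = PySem.Int.mod (-y2) p then gens
          else
            let gens :=
              match point_addition x1 y1 x2 y2 p with
              | (some x3, some y3) => gens ++ [(x3, y3)]
              | _ => gens
            match point_doubling x1 y1 a p with
            | (some x3, some y3) => gens ++ [(x3, y3)]
            | _ => gens
        else gens) gens
      = gens ++ (PySem.List.pyRange (i + 1) ((points.length : Int) + 1) 1).flatMap (fun j =>
          if i + j ≤ (points.length : Int) then
            let q1 := PySem.List.pyGetD points (i - 1) (0, 0)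
            let q2 := PySem.List.pyGetD points (j - 1) (0, 0)
            pairItems (PySem.Int.mod q1.1 p) (PySem.Int.mod q1.2 p)
                      (PySem.Int.mod q2.1 p) (PySem.Int.mod q2.2 p) a p
          else []) := by
    intro i gens
    apply foldl_body_eq_flatMap
    intro acc j
    by_cases h : i + j ≤ (points.length : Int)
    · simp only [if_pos h]
      exact body_eq acc _ _ _ _ a p
    · simp only [if_neg h, List.append_nil]
  rw [foldl_body_eq_flatMap _ _ (fun acc i => hinner i acc)]
  simp
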